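-- pv_equiv track=rewrite | github.com/every-algorithm/python | math/quincunx_matrix.py | quincunx_matrix
-- ===== SOURCE A (Python) =====
-- def quincunx_matrix(n=2):
--     matrix = []
--     for i in range(n):
--         row = []
--         for j in range(n + 1):
--             if (i - j) % 2 == 0:
--                 row.append(1)
--             else:
--                 row.append(-1)
--         matrix.append(row)
--     return matrix
-- ===== SOURCE B (Python) =====
-- def quincunx_matrix(n=2):
--     if n <= 0:
--         return []
--     row, v = [], 1
--     for _ in range(n + 1):
--         row.append(v)
--         v = -v
--     matrix = [row]
--     for _ in range(n - 1):
--         row = [-x for x in row]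
--         matrix.append(row)
--     return matrix
-- ===== Notes on version B (the rewrite author's own statement) =====
-- stated objective: alternative
-- what changed: B contains no parity test at all: it builds the first row with a sign accumulator that flips at each step, then derives each subsequent row as the elementwise negation of the previous one (a successive-negation chain), instead of evaluating (i-j)%2 per cell.
import Mathlib
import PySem

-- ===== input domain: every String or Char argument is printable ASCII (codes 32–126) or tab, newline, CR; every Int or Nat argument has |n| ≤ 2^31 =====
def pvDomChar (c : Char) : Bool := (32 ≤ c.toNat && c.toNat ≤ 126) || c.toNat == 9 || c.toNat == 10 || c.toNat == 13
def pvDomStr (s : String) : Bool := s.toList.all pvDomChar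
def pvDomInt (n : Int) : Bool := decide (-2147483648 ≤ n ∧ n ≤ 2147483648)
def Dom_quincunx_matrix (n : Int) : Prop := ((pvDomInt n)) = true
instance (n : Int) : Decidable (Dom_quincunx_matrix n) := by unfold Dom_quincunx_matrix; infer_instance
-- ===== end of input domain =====

-- B has no parity test: it builds the first row with a flipping sign accumulator and derives
-- each next row as the elementwise negation of the previous one (alternative algorithm, same cost).

-- ===== PORT A =====
def quincunx_matrix (n : Int) : List (List Int) :=
  (PySem.List.pyRange 0 n 1).foldl (fun matrix i =>
    matrix ++ [(PySem.List.pyRange 0 (n + 1) 1).foldl (fun row j =>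
      row ++ [if PySem.Int.mod (i - j) 2 = 0 then (1 : Int) else -1]) []]) []

-- ===== PORT B =====
def quincunx_matrix_alt (n : Int) : List (List Int) :=
  if n ≤ 0 then []
  else
    let row := ((PySem.List.pyRange 0 (n + 1) 1).foldl
      (fun (p : List Int × Int) _ => (p.1 ++ [p.2], -p.2)) ([], 1)).1
    ((PySem.List.pyRange 0 (n - 1) 1).foldl
      (fun (q : List (List Int) × List Int) _ =>
        (q.1 ++ [q.2.map (fun x => -x)], q.2.map (fun x => -x))) ([row], row)).1

-- ===== PRECONDITION & SPEC =====
def Spec_quincunx_matrix (n : Int) (out : List (List Int)) : Prop := out = quincunx_matrix_alt n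
instance (n : Int) (out : List (List Int)) : Decidable (Spec_quincunx_matrix n out) := by unfold Spec_quincunx_matrix; infer_instance

-- ===== CLAIM (what is proved, stated in full; the proofs are below) =====
def Claim_equal_quincunx_matrix : Prop := ∀ (n : Int), Dom_quincunx_matrix n → Spec_quincunx_matrix n (quincunx_matrix n)

-- ===== LEMMAS AND PROOFS =====

theorem pv_foldl_append_map {α β : Type} (f : α → β) (l : List α) (acc : List β) :
    l.foldl (fun a x => a ++ [f x]) acc = acc ++ l.map f := by
  induction l generalizing acc with
  | nil => simp
  | cons x xs ih => simp [List.foldl, ih]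

-- the first-row fold of B: accumulator with a flipping sign
theorem pv_row_fold (m : Nat) (acc : List Int) (v : Int) :
    (List.range m).foldl (fun (p : List Int × Int) _ => (p.1 ++ [p.2], -p.2)) (acc, v) =
      (acc ++ (List.range m).map (fun j => if j % 2 = 0 then v else -v),
       if m % 2 = 0 then v else -v) := by
  induction m with
  | zero => simp
  | succ k ih =>
    rw [List.range_succ, List.foldl_append, ih]
    simp only [List.foldl_cons, List.foldl_nil, List.map_append, List.map_cons, List.map_nil,
      List.append_assoc]
    rcases Nat.even_or_odd k with hk | hk
    · have h1 : k % 2 = 0 := Nat.even_iff.mp hk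
      have h2 : (k + 1) % 2 = 1 := by omega
      simp [h1, h2]
    · have h1 : k % 2 = 1 := Nat.odd_iff.mp hk
      have h2 : (k + 1) % 2 = 0 := by omega
      simp [h1, h2]

-- alternating-sign copies of a row
def pvNp (i : Nat) (r : List Int) : List Int :=
  if i % 2 = 0 then r else r.map (fun x => -x)

-- the row fold of B: successive negation chain
theorem pv_rows_fold (k : Nat) (r : List Int) :
    (List.range k).foldl (fun (q : List (List Int) × List Int) _ =>
        (q.1 ++ [q.2.map (fun x => -x)], q.2.map (fun x => -x))) ([r], r) =
      ((List.range (k + 1)).map (fun i => pvNp i r), pvNp k r) := by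
  induction k with
  | zero => simp [pvNp]
  | succ m ih =>
    rw [List.range_succ, List.foldl_append, ih]
    simp only [List.foldl_cons, List.foldl_nil]
    have hnp : (pvNp m r).map (fun x => -x) = pvNp (m + 1) r := by
      rcases Nat.even_or_odd m with hm | hm
      · have h1 : m % 2 = 0 := Nat.even_iff.mp hm
        have h2 : (m + 1) % 2 = 1 := by omega
        simp [pvNp, h1, h2]
      · have h1 : m % 2 = 1 := Nat.odd_iff.mp hm
        have h2 : (m + 1) % 2 = 0 := by omega
        simp [pvNp, h1, h2, List.map_map]
    rw [hnp, List.range_succ (n := m + 1), List.map_append]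
    simp

-- A's row i equals the alternating copy pvNp i of A's row 0
theorem pv_rowA_eq_np (n : Int) (i : Nat) :
    (PySem.List.pyRange 0 (n + 1) 1).map
        (fun j => if PySem.Int.mod ((i : Int) - j) 2 = 0 then (1 : Int) else -1) =
      pvNp i ((List.range (n + 1 - 0).toNat).map (fun j => if (j : Nat) % 2 = 0 then (1 : Int) else -1)) := by
  have hm : ∀ a : Int, PySem.Int.mod a 2 = a % 2 :=
    fun a => PySem.Int.mod_eq_emod_of_pos (by norm_num)
  rw [PySem.List.pyRange_one]
  simp only [hm, List.map_map, Function.comp_def, zero_add, pvNp]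
  split_ifs with hi
  · refine List.map_congr_left (fun j _ => ?_)
    split_ifs with h1 h2 h2 <;> first | rfl | (exfalso; omega)
  · refine List.map_congr_left (fun j _ => ?_)
    have hi' : i % 2 = 1 := by omega
    split_ifs with h1 h2 h2 <;> omega

-- ===== VERDICT (by name: the statement is the Claim_ definition above) =====
theorem quincunx_matrix_spec : Claim_equal_quincunx_matrix := by
  intro n _
  unfold Spec_quincunx_matrix quincunx_matrix quincunx_matrix_alt
  by_cases hn : n ≤ 0
  · rw [PySem.List.pyRange_one_eq_nil hn]
    simp [hn]
  · simp only [hn, if_false]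
    have hpos : 0 < n := by omega
    -- B: evaluate the two folds into a map of alternating copies of the base row
    conv_rhs =>
      rw [PySem.List.pyRange_one (a := 0) (b := n + 1), PySem.List.pyRange_one (a := 0) (b := n - 1)]
      rw [List.foldl_map, List.foldl_map, pv_row_fold]
    simp only [List.nil_append]
    conv_rhs => rw [pv_rows_fold]
    have hlen : (n - 1 - 0).toNat + 1 = (n - 0).toNat := by omega
    rw [hlen]
    -- A as a map of rows
    rw [pv_foldl_append_map (fun i => (PySem.List.pyRange 0 (n + 1) 1).foldl (fun row j =>
        row ++ [if PySem.Int.mod (i - j) 2 = 0 then (1 : Int) else -1]) [])]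
    simp only [List.nil_append]
    rw [PySem.List.pyRange_one (a := 0) (b := n), List.map_map]
    refine List.map_congr_left (fun i _ => ?_)
    simp only [Function.comp_def, zero_add]
    rw [pv_foldl_append_map (fun j => if PySem.Int.mod ((i : Int) - j) 2 = 0 then (1 : Int) else -1)]
    simp only [List.nil_append]
    exact pv_rowA_eq_np n i
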